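-- pv_equiv track=rewrite | github.com/yzl232/code_training | mianJing111111/geeksforgeeks/dp/Maximum Length Bitonic Subarray.py | bit
-- ===== SOURCE A (Python) =====
-- def bit(arr):
--     if not arr: return 0
--     dp1 = [1] *len(arr);  dp2 = dp1[:]  #默认值是1
--     for i in range(1, len(arr)):
--         dp1[i] = 1 if arr[i]<arr[i-1]  else dp1[i-1]+1
--     for i in range(len(arr)-2, -1, -1):  #像这种2个辅助array的。必须从后往前
--         dp2[i] = 1 if arr[i]<arr[i+1] else dp2[i+1]+1
--     return max( dp1[i]+dp2[i]-1 for i in range(len(arr)))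
-- ===== SOURCE B (Python) =====
-- def bit(arr):
--     # Single left-to-right pass with three scalars instead of two dp arrays
--     # and a final max pass.
--     if not arr:
--         return 0
--     best = cur = inc = 1
--     for i in range(1, len(arr)):
--         if arr[i] > arr[i-1]:
--             inc += 1
--             cur = inc
--         else:
--             if arr[i] == arr[i-1]:
--                 inc += 1
--             else:
--                 inc = 1
--             cur += 1
--         if cur > best:
--             best = cur
--     return best
-- ===== Notes on version B (the rewrite author's own statement) =====
-- stated objective: faster
-- what changed: Replaces the two dp arrays (a forward pass, a backward pass, and a final max pass) with a single left-to-right scan keeping three scalars: inc (non-strict increasing run ending at i), cur (dp1 at the start of the current non-strict decreasing run plus the distance walked into it) and a running best.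
import Mathlib
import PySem

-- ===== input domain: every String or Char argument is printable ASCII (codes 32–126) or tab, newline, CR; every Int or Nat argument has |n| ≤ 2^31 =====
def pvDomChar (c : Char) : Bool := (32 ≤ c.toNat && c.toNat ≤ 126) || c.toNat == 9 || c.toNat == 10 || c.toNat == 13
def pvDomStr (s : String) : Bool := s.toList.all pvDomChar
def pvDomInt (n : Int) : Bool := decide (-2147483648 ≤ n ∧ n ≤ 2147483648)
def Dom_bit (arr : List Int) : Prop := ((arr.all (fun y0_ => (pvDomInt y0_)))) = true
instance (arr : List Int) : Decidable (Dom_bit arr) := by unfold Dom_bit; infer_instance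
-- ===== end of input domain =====

-- B replaces A's two dp arrays (forward pass, backward pass, final max pass) by one
-- left-to-right scan over three scalars (O(1) extra space, single pass).


-- ===== PORT A =====
def bit (arr : List Int) : Int :=
  if arr = [] then 0
  else
    let n : Int := (arr.length : Int)
    let dp1 : List Int := List.replicate arr.length 1
    let dp2 : List Int := dp1
    let dp1 := (PySem.List.pyRange 1 n 1).foldl (fun d i =>
      PySem.List.pySetD d i
        (if PySem.List.pyGetD arr i 0 < PySem.List.pyGetD arr (i-1) 0 then 1
         else PySem.List.pyGetD d (i-1) 0 + 1)) dp1
    let dp2 := (PySem.List.pyRange (n-2) (-1) (-1)).foldl (fun d i =>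
      PySem.List.pySetD d i
        (if PySem.List.pyGetD arr i 0 < PySem.List.pyGetD arr (i+1) 0 then 1
         else PySem.List.pyGetD d (i+1) 0 + 1)) dp2
    (PySem.List.max? ((PySem.List.pyRange 0 n 1).map
        (fun i => PySem.List.pyGetD dp1 i 0 + PySem.List.pyGetD dp2 i 0 - 1))
      (fun x => x)).getD 0

-- ===== PORT B =====
def bit_alt (arr : List Int) : Int :=
  if arr = [] then 0
  else
    let st := (PySem.List.pyRange 1 (arr.length : Int) 1).foldl
      (fun (st : Int × Int × Int) i =>
        let best := st.1
        let cur := st.2.1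
        let inc := st.2.2
        let inc : Int :=
          if PySem.List.pyGetD arr (i-1) 0 < PySem.List.pyGetD arr i 0 then inc + 1
          else if PySem.List.pyGetD arr i 0 = PySem.List.pyGetD arr (i-1) 0 then inc + 1
          else 1
        let cur : Int :=
          if PySem.List.pyGetD arr (i-1) 0 < PySem.List.pyGetD arr i 0 then inc else cur + 1
        let best : Int := if best < cur then cur else best
        (best, cur, inc)) (1, 1, 1)
    st.1

-- ===== PRECONDITION & SPEC =====
def Spec_bit (arr : List Int) (out : Int) : Prop := out = bit_alt arr
instance (arr : List Int) (out : Int) : Decidable (Spec_bit arr out) := by unfold Spec_bit; infer_instance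

-- ===== CLAIM (what is proved, stated in full; the proofs are below) =====
def Claim_equal_bit : Prop := ∀ (arr : List Int), Dom_bit arr → Spec_bit arr (bit arr)

-- ===== LEMMAS AND PROOFS =====

-- dp1[i] of A: length of the non-strict increasing run ending at i
def pvR1 (arr : List Int) : Nat → Int
  | 0 => 1
  | i+1 => if arr.getD (i+1) 0 < arr.getD i 0 then 1 else pvR1 arr i + 1

-- dp2[i] of A: length of the non-strict decreasing run starting at i
def pvR2 (arr : List Int) (i : Nat) : Int :=
  if h : i + 1 < arr.length then
    (if arr.getD i 0 < arr.getD (i+1) 0 then 1 else pvR2 arr (i+1) + 1)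
  else 1
termination_by arr.length - i
decreasing_by omega

-- B's scalar `cur` after step i
def pvCur (arr : List Int) : Nat → Int
  | 0 => 1
  | i+1 => if arr.getD i 0 < arr.getD (i+1) 0 then pvR1 arr i + 1 else pvCur arr i + 1

-- B's scalar `best` after step i
def pvBst (arr : List Int) : Nat → Int
  | 0 => 1
  | i+1 => max (pvBst arr i) (pvCur arr (i+1))

theorem pvR2_last (arr : List Int) (i : Nat) (h : ¬ i + 1 < arr.length) :
    pvR2 arr i = 1 := by rw [pvR2, dif_neg h]

theorem pvR2_pos (arr : List Int) (i : Nat) : 1 ≤ pvR2 arr i := by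
  rw [pvR2]
  split
  · rename_i h1
    split
    · omega
    · have := pvR2_pos arr (i+1); omega
  · omega
termination_by arr.length - i
decreasing_by omega

theorem pvR1_le_pvCur (arr : List Int) (i : Nat) :
    1 ≤ pvR1 arr i ∧ pvR1 arr i ≤ pvCur arr i := by
  induction i with
  | zero => simp [pvR1, pvCur]
  | succ i ih =>
    simp only [pvR1, pvCur]
    split_ifs <;> omega

theorem pvCur_le_pvBst (arr : List Int) {j k : Nat} (h : j ≤ k) :
    pvCur arr j ≤ pvBst arr k := by
  induction k with
  | zero =>
    have : j = 0 := by omega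
    subst this; simp [pvBst, pvCur]
  | succ k ih =>
    rcases Nat.lt_or_ge j (k+1) with hk | hk
    · exact le_trans (ih (by omega)) (by simp [pvBst])
    · have : j = k + 1 := by omega
      subst this; simp [pvBst]

theorem pvBst_le (arr : List Int) (k : Nat) (M : Int)
    (h : ∀ j, j ≤ k → pvCur arr j ≤ M) : pvBst arr k ≤ M := by
  induction k with
  | zero => simpa [pvBst] using h 0 le_rfl
  | succ k ih =>
    simp only [pvBst, max_le_iff]
    exact ⟨ih (fun j hj => h j (by omega)), h (k+1) le_rfl⟩

-- downward: the running candidate plus the decreasing tail is bounded by the final best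
theorem pvD (arr : List Int) : ∀ (d i : Nat), i < arr.length → arr.length - 1 - i = d →
    pvCur arr i + pvR2 arr i - 1 ≤ pvBst arr (arr.length - 1) := by
  intro d
  induction d with
  | zero =>
    intro i hi hd
    have hi' : i = arr.length - 1 := by omega
    rw [pvR2_last arr i (by omega)]
    have := pvCur_le_pvBst arr (j := i) (k := arr.length - 1) (by omega)
    omega
  | succ d ih =>
    intro i hi hd
    have hi1 : i + 1 < arr.length := by omega
    rw [pvR2, dif_pos hi1]
    split_ifs with hlt
    · have := pvCur_le_pvBst arr (j := i) (k := arr.length - 1) (by omega)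
      omega
    · have hc : pvCur arr (i+1) = pvCur arr i + 1 := by
        simp only [pvCur]; rw [if_neg hlt]
      have := ih (i+1) hi1 (by omega)
      omega

-- forward: cur equals dp1 at the start of the current non-strict decreasing run
theorem pvE (arr : List Int) (i : Nat) :
    ∃ p, p ≤ i ∧ pvCur arr i = pvR1 arr p + ((i : Int) - (p : Int)) ∧
      ∀ j, p ≤ j → j < i → arr.getD (j+1) 0 ≤ arr.getD j 0 := by
  induction i with
  | zero => exact ⟨0, le_rfl, by simp [pvCur, pvR1], by omega⟩
  | succ i ih =>
    by_cases hlt : arr.getD i 0 < arr.getD (i+1) 0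
    · refine ⟨i+1, le_rfl, ?_, by omega⟩
      have h1 : pvCur arr (i+1) = pvR1 arr i + 1 := by
        simp only [pvCur]; rw [if_pos hlt]
      have h2 : pvR1 arr (i+1) = pvR1 arr i + 1 := by
        simp only [pvR1]; rw [if_neg (by omega)]
      rw [h1, h2]; push_cast; ring
    · obtain ⟨p, hp, hc, hdec⟩ := ih
      refine ⟨p, by omega, ?_, ?_⟩
      · have h1 : pvCur arr (i+1) = pvCur arr i + 1 := by
          simp only [pvCur]; rw [if_neg hlt]
        rw [h1, hc]; push_cast; ring
      · intro j hpj hji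
        rcases Nat.lt_or_ge j i with hj | hj
        · exact hdec j hpj hj
        · have : j = i := by omega
          subst this; omega

-- a non-strict decreasing stretch from p to i forces dp2[p] ≥ i - p + 1
theorem pvR (arr : List Int) : ∀ (d p i : Nat), p ≤ i → i < arr.length → i - p = d →
    (∀ j, p ≤ j → j < i → arr.getD (j+1) 0 ≤ arr.getD j 0) →
    (i : Int) - (p : Int) + 1 ≤ pvR2 arr p := by
  intro d
  induction d with
  | zero =>
    intro p i hpi hi hd _
    have : p = i := by omega
    subst this
    have := pvR2_pos arr p
    omega
  | succ d ih =>
    intro p i hpi hi hd hdec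
    have hp1 : p + 1 ≤ i := by omega
    have hle : arr.getD (p+1) 0 ≤ arr.getD p 0 := hdec p le_rfl (by omega)
    have h2 : pvR2 arr p = pvR2 arr (p+1) + 1 := by
      rw [pvR2, dif_pos (by omega), if_neg (by omega)]
    have := ih (p+1) i hp1 hi (by omega) (fun j hj hji => hdec j (by omega) hji)
    rw [h2]
    push_cast at this ⊢
    omega

theorem pv_getD_set (l : List Int) (k j : Nat) (v : Int) (hk : k < l.length) :
    (l.set k v).getD j 0 = if j = k then v else l.getD j 0 := by
  rcases eq_or_ne j k with h | h
  · subst h; simp [List.getD, hk]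
  · rw [List.getD, List.getD, List.getElem?_set, if_neg (by omega : ¬ k = j), if_neg h]

-- the first loop of A fills dp1 with pvR1
theorem pv_dp1_loop (arr : List Int) : ∀ (d k : Nat) (s : List Int), 1 ≤ k →
    k ≤ arr.length → arr.length - k = d → s.length = arr.length →
    (∀ j : Nat, j < arr.length → s.getD j 0 = if j < k then pvR1 arr j else 1) →
    (((PySem.List.pyRange (k:Int) (arr.length:Int) 1).foldl
        (fun dd i => PySem.List.pySetD dd i
          (if PySem.List.pyGetD arr i 0 < PySem.List.pyGetD arr (i-1) 0 then 1
           else PySem.List.pyGetD dd (i-1) 0 + 1)) s).length = arr.length ∧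
      ∀ j : Nat, j < arr.length →
        ((PySem.List.pyRange (k:Int) (arr.length:Int) 1).foldl
          (fun dd i => PySem.List.pySetD dd i
            (if PySem.List.pyGetD arr i 0 < PySem.List.pyGetD arr (i-1) 0 then 1
             else PySem.List.pyGetD dd (i-1) 0 + 1)) s).getD j 0 = pvR1 arr j) := by
  intro d
  induction d with
  | zero =>
    intro k s hk1 hkn hd hs hinv
    have hkeq : k = arr.length := by omega
    rw [PySem.List.pyRange_one_eq_nil (by exact_mod_cast le_of_eq hkeq.symm)]
    simp only [List.foldl_nil]
    refine ⟨hs, fun j hj => ?_⟩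
    rw [hinv j hj, if_pos (by omega)]
  | succ d ih =>
    intro k s hk1 hkn hd hs hinv
    have hk : k < arr.length := by omega
    rw [PySem.List.pyRange_one_cons (by exact_mod_cast hk), List.foldl_cons,
      show ((k:Int)+1) = (((k+1:Nat)):Int) by push_cast; ring]
    have hc1 : ((k:Int)-1) = (((k-1:Nat)):Int) := by omega
    rw [hc1]
    simp only [PySem.List.pyGetD_natCast, PySem.List.pySetD_natCast]
    have hval : (if arr.getD (k-1+1) 0 < arr.getD (k-1) 0 then (1:Int)
        else pvR1 arr (k-1) + 1) = pvR1 arr k := by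
      conv_rhs => rw [show k = (k-1)+1 by omega]
      rw [pvR1]
    apply ih (k+1) _ (by omega) (by omega) (by omega) (by simpa using hs)
    intro j hj
    rw [pv_getD_set s k j _ (by omega)]
    rcases eq_or_ne j k with he | he
    · subst he
      have h1 : s.getD (j-1) 0 = pvR1 arr (j-1) := by
        rw [hinv (j-1) (by omega), if_pos (by omega)]
      rw [if_pos rfl, h1,
        show (if j < j + 1 then pvR1 arr j else (1:Int)) = pvR1 arr j from if_pos (by omega)]
      rw [show j-1+1 = j by omega] at hval
      exact hval
    · rw [if_neg he, hinv j hj]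
      by_cases hlt : j < k
      · rw [if_pos hlt, if_pos (by omega)]
      · rw [if_neg hlt, if_neg (by omega)]

-- the second loop of A fills dp2 with pvR2
theorem pv_dp2_loop (arr : List Int) : ∀ (t : Nat) (s : List Int),
    t ≤ arr.length - 1 → s.length = arr.length →
    (∀ j : Nat, j < arr.length → s.getD j 0 = if t ≤ j then pvR2 arr j else 1) →
    (((PySem.List.pyRange ((t:Int)-1) (-1) (-1)).foldl
        (fun dd i => PySem.List.pySetD dd i
          (if PySem.List.pyGetD arr i 0 < PySem.List.pyGetD arr (i+1) 0 then 1
           else PySem.List.pyGetD dd (i+1) 0 + 1)) s).length = arr.length ∧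
      ∀ j : Nat, j < arr.length →
        ((PySem.List.pyRange ((t:Int)-1) (-1) (-1)).foldl
          (fun dd i => PySem.List.pySetD dd i
            (if PySem.List.pyGetD arr i 0 < PySem.List.pyGetD arr (i+1) 0 then 1
             else PySem.List.pyGetD dd (i+1) 0 + 1)) s).getD j 0 = pvR2 arr j) := by
  intro t
  induction t with
  | zero =>
    intro s ht hs hinv
    rw [PySem.List.pyRange_neg_one_eq_nil (by norm_num)]
    simp only [List.foldl_nil]
    refine ⟨hs, fun j hj => ?_⟩
    rw [hinv j hj, if_pos (by omega)]
  | succ t ih =>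
    intro s ht hs hinv
    have htn : t + 1 < arr.length := by omega
    rw [show (((t+1:Nat):Int)-1) = ((t:Nat):Int) by push_cast; ring,
      PySem.List.pyRange_neg_one_cons (by omega), List.foldl_cons,
      show ((t:Int)+1) = (((t+1:Nat)):Int) by push_cast; ring]
    simp only [PySem.List.pyGetD_natCast, PySem.List.pySetD_natCast]
    have hval : (if arr.getD t 0 < arr.getD (t+1) 0 then (1:Int)
        else pvR2 arr (t+1) + 1) = pvR2 arr t := by
      conv_rhs => rw [pvR2]
      rw [dif_pos htn]
    apply ih _ (by omega) (by simpa using hs)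
    intro j hj
    rw [pv_getD_set s t j _ (by omega)]
    rcases eq_or_ne j t with he | he
    · subst he
      have h1 : s.getD (j+1) 0 = pvR2 arr (j+1) := by
        rw [hinv (j+1) (by omega), if_pos (by omega)]
      rw [if_pos rfl, h1, hval,
        show (if j ≤ j then pvR2 arr j else (1:Int)) = pvR2 arr j from if_pos (by omega)]
    · rw [if_neg he, hinv j hj]
      by_cases hle : t + 1 ≤ j
      · rw [if_pos hle, if_pos (by omega)]
      · rw [if_neg hle, if_neg (by omega)]

-- B's fold state after k steps
theorem pv_alt_loop (arr : List Int) : ∀ (k : Nat),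
    (PySem.List.pyRange 1 (1 + (k:Int)) 1).foldl
      (fun (st : Int × Int × Int) i =>
        let best := st.1
        let cur := st.2.1
        let inc := st.2.2
        let inc : Int :=
          if PySem.List.pyGetD arr (i-1) 0 < PySem.List.pyGetD arr i 0 then inc + 1
          else if PySem.List.pyGetD arr i 0 = PySem.List.pyGetD arr (i-1) 0 then inc + 1
          else 1
        let cur : Int :=
          if PySem.List.pyGetD arr (i-1) 0 < PySem.List.pyGetD arr i 0 then inc else cur + 1
        let best : Int := if best < cur then cur else best
        (best, cur, inc)) (1, 1, 1) = (pvBst arr k, pvCur arr k, pvR1 arr k) := by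
  intro k
  induction k with
  | zero =>
    rw [show (1 + ((0:Nat):Int)) = 1 by norm_num, PySem.List.pyRange_one_eq_nil le_rfl]
    simp [pvBst, pvCur, pvR1]
  | succ k ih =>
    rw [show (1 + ((k+1:Nat):Int)) = (1 + (k:Nat)) + 1 by push_cast; ring,
      PySem.List.pyRange_one_succ_right (by omega), List.foldl_append, ih]
    simp only [List.foldl_cons, List.foldl_nil]
    rw [show (1 + (k:Int)) - 1 = ((k:Nat):Int) by ring,
      show (1 + (k:Int)) = (((k+1:Nat)):Int) by push_cast; ring]
    simp only [PySem.List.pyGetD_natCast, List.getD]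
    simp only [pvBst, pvCur, pvR1]
    split_ifs <;> simp_all <;> omega

theorem pv_alt_eval (arr : List Int) (h : arr ≠ []) :
    bit_alt arr = pvBst arr (arr.length - 1) := by
  have hn : 0 < arr.length := List.length_pos_iff.mpr h
  simp only [bit_alt, if_neg h]
  rw [show ((arr.length : Int)) = 1 + ((arr.length - 1 : Nat) : Int) by omega,
    pv_alt_loop arr (arr.length - 1)]

theorem pv_bit_eval (arr : List Int) (h : arr ≠ []) :
    bit arr = (PySem.List.max? ((List.range arr.length).map
      (fun j => pvR1 arr j + pvR2 arr j - 1)) (fun x => x)).getD 0 := by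
  have hn : 0 < arr.length := List.length_pos_iff.mpr h
  simp only [bit, if_neg h]
  have h1 := pv_dp1_loop arr (arr.length - 1) 1 (List.replicate arr.length 1)
    le_rfl hn (by omega) (by simp)
    (by
      intro j hj
      rw [List.getD_replicate _ hj]
      by_cases h0 : j < 1
      · rw [if_pos h0, show j = 0 by omega]
        rfl
      · rw [if_neg h0])
  push_cast at h1
  obtain ⟨h1len, h1get⟩ := h1
  have h2 := pv_dp2_loop arr (arr.length - 1) (List.replicate arr.length 1)
    le_rfl (by simp)
    (by
      intro j hj
      rw [List.getD_replicate _ hj]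
      by_cases h0 : arr.length - 1 ≤ j
      · rw [if_pos h0, show j = arr.length - 1 by omega,
          pvR2_last arr (arr.length - 1) (by omega)]
      · rw [if_neg h0])
  rw [show ((arr.length - 1 : Nat) : Int) - 1 = (arr.length : Int) - 2 by omega] at h2
  obtain ⟨h2len, h2get⟩ := h2
  rw [PySem.List.pyRange_zero_nat, List.map_map,
    List.map_congr_left (g := fun j => pvR1 arr j + pvR2 arr j - 1) ?_]
  intro j hj
  rw [List.mem_range] at hj
  simp only [Function.comp_apply, PySem.List.pyGetD_natCast]
  rw [h1get j hj, h2get j hj]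

-- ===== VERDICT (by name: the statement is the Claim_ definition above) =====
theorem bit_spec : Claim_equal_bit := by
  unfold Claim_equal_bit Spec_bit
  intro arr _
  by_cases h : arr = []
  · subst h; rfl
  · rw [pv_bit_eval arr h, pv_alt_eval arr h]
    have hn : 0 < arr.length := List.length_pos_iff.mpr h
    set L := (List.range arr.length).map (fun j => pvR1 arr j + pvR2 arr j - 1) with hL
    have hLne : L ≠ [] := by
      simp [hL, List.map_eq_nil_iff, List.range_eq_nil]; omega
    obtain ⟨m, hm⟩ : ∃ m, PySem.List.max? L (fun x => x) = some m := by
      cases hc : PySem.List.max? L (fun x => x) with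
      | none => exact absurd ((PySem.List.max?_eq_none_iff L _).mp hc) hLne
      | some m => exact ⟨m, rfl⟩
    rw [hm]
    simp only [Option.getD_some]
    -- m is the max of the A-values; show m = pvBst (n-1)
    have hmem := PySem.List.max?_mem hm
    have hmax := PySem.List.max?_isMax hm
    obtain ⟨p, hp, hpm⟩ : ∃ p, p < arr.length ∧ pvR1 arr p + pvR2 arr p - 1 = m := by
      rw [hL] at hmem
      simp only [List.mem_map, List.mem_range] at hmem
      obtain ⟨p, hp, hpe⟩ := hmem
      exact ⟨p, hp, hpe⟩
    apply le_antisymm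
    · -- every A-value ≤ pvBst (n-1)
      rw [← hpm]
      have hk := pvR1_le_pvCur arr p
      have hd := pvD arr (arr.length - 1 - p) p hp rfl
      omega
    · -- pvBst (n-1) ≤ m
      apply pvBst_le
      intro j hj
      have hjlt : j < arr.length := by omega
      obtain ⟨q, hq, hce, hdec⟩ := pvE arr j
      have hr := pvR arr (j - q) q j hq hjlt rfl hdec
      have hgm : pvR1 arr q + pvR2 arr q - 1 ≤ m := by
        apply hmax
        rw [hL]
        simp only [List.mem_map, List.mem_range]
        exact ⟨q, by omega, rfl⟩
      omega
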